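-- pv_equiv track=rewrite | github.com/abcd-EGH/srnn-ae | srnn_ae/utils.py | find_anomaly_windows
-- ===== SOURCE A (Python) =====
-- def find_anomaly_windows(labels, anomaly_label=-1):
--     """
--     Find contiguous anomaly windows in the label array.
--     """
--     windows = []
--     in_anomaly = False
--     start = 0
--
--     for i, label in enumerate(labels):
--         if label == anomaly_label and not in_anomaly:
--             in_anomaly = True
--             start = i
--         elif label != anomaly_label and in_anomaly:
--             in_anomaly = False
--             end = i - 1
--             windows.append((start, end))
--
--     if in_anomaly:
--         windows.append((start, len(labels) - 1))
--
--     return windows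
-- ===== SOURCE B (Python) =====
-- def find_anomaly_windows(labels, anomaly_label=-1):
--     """
--     Find contiguous anomaly windows in the label array.
--     Run-scanning: consume maximal runs of equal key (== anomaly_label) at once.
--     """
--     windows = []
--     n = len(labels)
--     i = 0
--     while i < n:
--         key = labels[i] == anomaly_label
--         j = i + 1
--         while j < n and (labels[j] == anomaly_label) == key:
--             j += 1
--         if key:
--             windows.append((i, j - 1))
--         i = j
--     return windows
-- ===== Notes on version B (the rewrite author's own statement) =====
-- stated objective: alternative
-- what changed: Replaced A's per-element in_anomaly/start flag machine with a run-scanning loop that consumes each maximal run of equal key (label == anomaly_label) at once and emits (run_start, run_end) for anomaly runs.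
import Mathlib
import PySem

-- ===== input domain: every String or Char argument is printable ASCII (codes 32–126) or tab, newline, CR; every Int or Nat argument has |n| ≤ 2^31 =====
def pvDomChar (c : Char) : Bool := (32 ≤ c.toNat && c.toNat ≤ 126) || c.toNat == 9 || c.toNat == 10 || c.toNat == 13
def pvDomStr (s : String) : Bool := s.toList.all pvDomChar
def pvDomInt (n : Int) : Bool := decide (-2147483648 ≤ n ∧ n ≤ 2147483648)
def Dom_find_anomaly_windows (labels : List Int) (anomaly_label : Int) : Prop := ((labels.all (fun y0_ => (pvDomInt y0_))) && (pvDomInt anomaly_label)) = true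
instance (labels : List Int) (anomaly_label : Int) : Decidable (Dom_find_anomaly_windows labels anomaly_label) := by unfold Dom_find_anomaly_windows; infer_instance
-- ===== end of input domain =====

-- B replaces A's in_anomaly/start flag machine by a run-scanning loop that consumes
-- each maximal run of equal key (label == anomaly_label) at once (alternative decomposition).

-- ===== PORT A =====
-- the loop body of A (the if/elif over (windows, in_anomaly, start))
def stepA (a : Int) (st : List (Int × Int) × Bool × Int) (p : Int × Int) :
    List (Int × Int) × Bool × Int :=
  if p.2 = a ∧ st.2.1 = false then (st.1, true, p.1)
  else if p.2 ≠ a ∧ st.2.1 = true then (st.1 ++ [(st.2.2, p.1 - 1)], false, st.2.2)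
  else st

def find_anomaly_windows (labels : List Int) (anomaly_label : Int) : List (Int × Int) :=
  let st := (PySem.List.enumerate labels).foldl (stepA anomaly_label) ([], false, 0)
  if st.2.1 then st.1 ++ [(st.2.2, (labels.length : Int) - 1)] else st.1

-- ===== PORT B =====
-- B's outer while-loop: the current suffix of labels together with its start index idx;
-- the inner `while j < n and …` scan is the takeWhile/dropWhile split of the suffix.
def runScan (labels : List Int) (a : Int) (idx : Int) : List (Int × Int) :=
  match labels with
  | [] => []
  | x :: xs =>
    let key := decide (x = a)
    let run := xs.takeWhile (fun y => decide (y = a) == key)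
    let rest := xs.dropWhile (fun y => decide (y = a) == key)
    let j : Int := idx + 1 + run.length
    let tail := runScan rest a j
    if key then (idx, j - 1) :: tail else tail
termination_by labels.length
decreasing_by
  simpa [Nat.lt_succ_iff] using List.length_dropWhile_le (fun y => decide (y = a) == decide (x = a)) xs

def find_anomaly_windows_alt (labels : List Int) (anomaly_label : Int) : List (Int × Int) :=
  runScan labels anomaly_label 0

-- ===== PRECONDITION & SPEC =====
def Spec_find_anomaly_windows (labels : List Int) (anomaly_label : Int) (out : List (Int × Int)) : Prop := out = find_anomaly_windows_alt labels anomaly_label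
instance (labels : List Int) (anomaly_label : Int) (out : List (Int × Int)) : Decidable (Spec_find_anomaly_windows labels anomaly_label out) := by unfold Spec_find_anomaly_windows; infer_instance

-- ===== CLAIM (what is proved, stated in full; the proofs are below) =====
def Claim_equal_find_anomaly_windows : Prop := ∀ (labels : List Int) (anomaly_label : Int), Dom_find_anomaly_windows labels anomaly_label → Spec_find_anomaly_windows labels anomaly_label (find_anomaly_windows labels anomaly_label)

-- ===== LEMMAS AND PROOFS =====
-- A's final "if in_anomaly: close trailing window" step, factored over an arbitrary end index
def finishA (st : List (Int × Int) × Bool × Int) (e : Int) : List (Int × Int) :=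
  if st.2.1 then st.1 ++ [(st.2.2, e)] else st.1

-- skipping one non-anomaly element is absorbed by the run scan
lemma runScan_skip (a x : Int) (xs : List Int) (n : Int) (hx : ¬ x = a) :
    runScan (x :: xs) a n = runScan xs a (n + 1) := by
  cases xs with
  | nil => simp [runScan, hx]
  | cons y ys =>
    by_cases hy : y = a
    · simp [runScan, hx, hy]
    · simp only [runScan, List.takeWhile_cons, List.dropWhile_cons]
      simp [hx, hy]
      congr 1
      ring

lemma key_lemma (a : Int) (l : List Int) : ∀ (n : Int) (acc : List (Int × Int)) (b : Bool) (s : Int),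
    finishA ((PySem.List.enumerate l n).foldl (stepA a) (acc, b, s)) (n + l.length - 1)
      = acc ++ (if b then
          (s, n + ((l.takeWhile (fun y => decide (y = a))).length : Int) - 1)
            :: runScan (l.dropWhile (fun y => decide (y = a))) a (n + ((l.takeWhile (fun y => decide (y = a))).length : Int))
        else runScan l a n) := by
  induction l with
  | nil =>
    intro n acc b s
    cases b <;> simp [finishA, runScan, PySem.List.enumerate]
  | cons x xs ih =>
    intro n acc b s
    rw [PySem.List.enumerate_cons, List.foldl_cons]
    have he : (n + ((x :: xs).length : Int) - 1) = ((n + 1) + (xs.length : Int) - 1) := by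
      push_cast [List.length_cons]; ring
    rw [he]
    by_cases hx : x = a <;> cases b
    · -- x = a, b = false: enter anomaly
      have hstep : stepA a (acc, false, s) (n, x) = (acc, true, n) := by
        simp [stepA, hx]
      rw [hstep, ih (n + 1) acc true n]
      simp [runScan, hx]
    · -- x = a, b = true: stay in anomaly
      have hstep : stepA a (acc, true, s) (n, x) = (acc, true, s) := by
        simp [stepA, hx]
      rw [hstep, ih (n + 1) acc true s]
      simp only [hx, List.takeWhile_cons, List.dropWhile_cons, decide_true, if_true,
        List.length_cons]
      push_cast
      ring_nf
    · -- x ≠ a, b = false: stay outside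
      have hstep : stepA a (acc, false, s) (n, x) = (acc, false, s) := by
        simp [stepA, hx]
      rw [hstep, ih (n + 1) acc false s]
      simp [runScan_skip a x xs n hx]
    · -- x ≠ a, b = true: close window
      have hstep : stepA a (acc, true, s) (n, x) = (acc ++ [(s, n - 1)], false, s) := by
        simp [stepA, hx]
      rw [hstep, ih (n + 1) (acc ++ [(s, n - 1)]) false s]
      simp [hx, runScan_skip a x xs n hx]

-- ===== VERDICT (by name: the statement is the Claim_ definition above) =====
theorem find_anomaly_windows_spec : Claim_equal_find_anomaly_windows := by
  intro l a _
  show find_anomaly_windows l a = find_anomaly_windows_alt l a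
  have h := key_lemma a l 0 [] false 0
  simp only [zero_add] at h
  simpa [find_anomaly_windows, find_anomaly_windows_alt, finishA] using h
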